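-- pv_equiv track=rewrite | github.com/Aly-Hissam1/Phylogenetic-Tree-Construction-Python | SRC/Maximum Parsimony/Maximum parsimony algorithm.py.py | informative_filter
-- ===== SOURCE A (Python) =====
-- def informative (column):
--     c=[]
--     for i in range(len(column)-1):
--         c_num=0
--         for y in range(len(column)-(i+1)):
--             if column[i] == column[-(y+1)]:
--                 c_num += 1
--             else:
--                  continue
--         c.append(str(c_num))
--         del c_num
--     result = 'True'
--     for num in c:
--         if int(num) >1:
--             del result
--             result = "False"
--             break
--         else:
--             continue
--     return (result)
--
-- def informative_filter(aligned_seq_list):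
--     list_of_informatives=[]
--     R = [list(i) for i in zip(*aligned_seq_list)] # flip the matrix to get the columns
--     for lists in R:
--         if informative(lists) == "True":
--             list_of_informatives.append(lists)
--         else:
--             continue
--     return (list_of_informatives)
-- ===== SOURCE B (Python) =====
-- def _has_run_of_3(s):
--     run = 1
--     for i in range(1, len(s)):
--         run = run + 1 if s[i] == s[i - 1] else 1
--         if run == 3:
--             return True
--     return False
--
-- def informative_filter(aligned_seq_list):
--     result = []
--     for col in zip(*aligned_seq_list):
--         if not _has_run_of_3(sorted(col)):
--             result.append(list(col))
--     return result
-- ===== Notes on version B (the rewrite author's own statement) =====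
-- stated objective: faster
-- what changed: Per column, A counts later occurrences of every position with a quadratic nested scan and round-trips the counts through str/int; B sorts a copy of the column once and does one linear scan for a run of three equal characters.
import Mathlib
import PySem

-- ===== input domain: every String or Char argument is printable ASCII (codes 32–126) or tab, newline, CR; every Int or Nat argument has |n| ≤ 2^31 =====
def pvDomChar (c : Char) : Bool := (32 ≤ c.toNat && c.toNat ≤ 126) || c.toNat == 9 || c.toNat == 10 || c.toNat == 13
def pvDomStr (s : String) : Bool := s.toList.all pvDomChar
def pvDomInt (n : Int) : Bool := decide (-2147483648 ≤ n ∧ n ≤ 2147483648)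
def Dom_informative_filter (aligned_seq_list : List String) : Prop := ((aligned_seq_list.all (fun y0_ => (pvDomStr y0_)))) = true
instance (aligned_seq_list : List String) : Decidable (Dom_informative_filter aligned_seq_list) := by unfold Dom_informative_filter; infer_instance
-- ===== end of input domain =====

-- B replaces A's quadratic pairwise-count per column (with a str/int round trip) by
-- sort-a-copy-then-scan-for-a-run-of-three; objective: faster (O(n log n) per column vs O(n^2)).


-- ===== PORT A =====
-- hand port of 'R = [list(i) for i in zip(*aligned_seq_list)]' (zip over a variable number of
-- strings, elements are 1-char strings): column k holds the k-th char of every row, for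
-- k < minimum row length (no rows -> no columns); exact. Shared by both ports (Source B uses the
-- same zip(*...) transposition).
def pvColumns (xs : List String) : List (List String) :=
  let rows := xs.map (fun s => s.toList.map (fun c => String.mk [c]))
  match (rows.map List.length).min? with
  | none => []
  | some m => (List.range m).map (fun k => rows.map (fun r => r.getD k ""))

-- the final 'for num in c: if int(num) > 1: result = "False"; break' loop of 'informative'.
-- Python stores str(c_num) in c and immediately reads it back with int(num); that round trip is
-- the identity on these ints, and PySem has no citable int∘str lemma, so the port keeps the
-- c_num values themselves in c (value-exact; nothing else ever reads the strings).
def pvCheckNums : List Int → String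
  | [] => "True"
  | num :: rest => if 1 < num then "False" else pvCheckNums rest

def informative (column : List String) : String :=
  let L : Int := (column.length : Int)
  let c : List Int :=
    (PySem.List.pyRange 0 (L - 1) 1).foldl (fun acc i =>
      acc ++ [(PySem.List.pyRange 0 (L - (i + 1)) 1).foldl (fun c_num y =>
        if PySem.List.pyGetD column i "" == PySem.List.pyGetD column (-(y + 1)) ""
        then c_num + 1 else c_num) 0]) []
  pvCheckNums c

def informative_filter (aligned_seq_list : List String) : List (List String) :=
  (pvColumns aligned_seq_list).foldl
    (fun acc lists => if informative lists == "True" then acc ++ [lists] else acc) []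

-- ===== PORT B =====
-- port of Source B's _has_run_of_3: scan adjacent pairs keeping the current run length
def pvRunScan : String → Nat → List String → Bool
  | _, _, [] => false
  | prev, run, x :: rest =>
    if x == prev then
      if run + 1 == 3 then true else pvRunScan x (run + 1) rest
    else pvRunScan x 1 rest

def pvHasTriple : List String → Bool
  | [] => false
  | x :: rest => pvRunScan x 1 rest

def informative_filter_alt (aligned_seq_list : List String) : List (List String) :=
  (pvColumns aligned_seq_list).filter
    (fun col => ! pvHasTriple (PySem.List.sorted col (fun s => s) false))

-- ===== PRECONDITION & SPEC =====
def Spec_informative_filter (aligned_seq_list : List String) (out : List (List String)) : Prop := out = informative_filter_alt aligned_seq_list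
instance (aligned_seq_list : List String) (out : List (List String)) : Decidable (Spec_informative_filter aligned_seq_list out) := by unfold Spec_informative_filter; infer_instance

-- ===== CLAIM (what is proved, stated in full; the proofs are below) =====
def Claim_equal_informative_filter : Prop := ∀ (aligned_seq_list : List String), Dom_informative_filter aligned_seq_list → Spec_informative_filter aligned_seq_list (informative_filter aligned_seq_list)

-- ===== LEMMAS AND PROOFS =====

-- pvCheckNums returns "True" iff no listed count exceeds 1
theorem pvCheckNums_eq_true_iff (l : List Int) :
    pvCheckNums l = "True" ↔ ∀ v ∈ l, v ≤ 1 := by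
  induction l with
  | nil => simp [pvCheckNums]
  | cons x t ih =>
    by_cases h : 1 < x <;> simp [pvCheckNums, h, ih] <;> omega

-- a conditional-increment foldl is a count on the mapped list
theorem pv_foldl_count (f : Int → String) (x : String) (l : List Int) (a0 : Int) :
    l.foldl (fun a y => if x == f y then a + 1 else a) a0
      = a0 + ((l.map f).count x : Int) := by
  induction l generalizing a0 with
  | nil => simp
  | cons y t ih =>
    rw [List.foldl_cons]
    by_cases h : x = f y
    · rw [if_pos (by simpa using h), ih]
      have hb : (f y == x) = true := by simp [h]
      simp only [List.map_cons, List.count_cons, hb, if_pos]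
      push_cast
      ring
    · rw [if_neg (by simpa using h), ih]
      have hb : (f y == x) = false := by simp; exact fun hh => h hh.symm
      simp [List.count_cons, hb]

-- the inner range's negative indices read the tail of the column, back to front
theorem pv_map_neg_get (col : List String) (k : Nat) (hk : k ≤ col.length) :
    (PySem.List.pyRange 0 (k : Int) 1).map (fun y => PySem.List.pyGetD col (-(y + 1)) "")
      = (col.drop (col.length - k)).reverse := by
  induction k with
  | zero => simp [PySem.List.pyRange_one_eq_nil]
  | succ k ih =>
    have hk' : k ≤ col.length := Nat.le_of_succ_le hk
    have hstep : PySem.List.pyRange 0 ((k : Int) + 1) 1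
        = PySem.List.pyRange 0 (k : Int) 1 ++ [(k : Int)] :=
      PySem.List.pyRange_one_succ_right (by exact_mod_cast Nat.zero_le k)
    have hidx : col.length - (k + 1) < col.length := by omega
    have hdrop : col.drop (col.length - (k + 1))
        = col[col.length - (k + 1)] :: col.drop (col.length - k) := by
      have := List.drop_eq_getElem_cons hidx
      simpa [show col.length - (k + 1) + 1 = col.length - k by omega] using this
    have hget : PySem.List.pyGetD col (-((k : Int) + 1)) "" = col[col.length - (k + 1)] := by
      have h2 := PySem.List.pyGetD_neg_natCast col (k + 1) "" (by omega) (by omega)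
      have hc : -(((k + 1 : Nat)) : Int) = -((k : Int) + 1) := by push_cast; ring
      rw [hc] at h2
      exact h2
    have hc2 : (((k + 1 : Nat)) : Int) = (k : Int) + 1 := by push_cast; ring
    rw [hc2, hstep, List.map_append, ih hk', hdrop]
    simp only [List.map_cons, List.map_nil, List.reverse_cons, hget]

-- the inner loop of 'informative' counts the later occurrences of column[n]
theorem pv_inner_eq_count (col : List String) (n : Nat) (hn : n < col.length) :
    (PySem.List.pyRange 0 ((col.length : Int) - ((n : Int) + 1)) 1).foldl
      (fun c_num y =>
        if PySem.List.pyGetD col (n : Int) "" == PySem.List.pyGetD col (-(y + 1)) ""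
        then c_num + 1 else c_num) 0
    = (((col.drop (n + 1)).count (col.getD n "")) : Int) := by
  have hL : (col.length : Int) - ((n : Int) + 1) = ((col.length - (n + 1) : Nat) : Int) := by
    omega
  rw [hL, pv_foldl_count, pv_map_neg_get col (col.length - (n + 1)) (by omega),
    show col.length - (col.length - (n + 1)) = n + 1 by omega]
  simp

-- an element with three occurrences has a position with two occurrences after it
theorem pv_exists_pos (col : List String) (a : String) (h : 3 ≤ col.count a) :
    ∃ n, n + 1 < col.length ∧ col.getD n "" = a ∧ 2 ≤ (col.drop (n + 1)).count a := by
  induction col with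
  | nil => simp at h
  | cons x t ih =>
    by_cases hx : x = a
    · refine ⟨0, ?_, by simp [hx], ?_⟩
      · have h2 : 2 ≤ t.count a := by simp [hx] at h; omega
        have h3 := List.count_le_length (l := t) (a := a)
        simp; omega
      · simp [hx] at h ⊢; omega
    · have h3 : 3 ≤ t.count a := by simp [hx] at h; omega
      obtain ⟨n, h1, h2, h4⟩ := ih h3
      exact ⟨n + 1, by simpa using Nat.succ_lt_succ h1, by simpa using h2, by simpa using h4⟩

-- "each position has at most one later duplicate" = "no character occurs three times"
theorem pv_pos_iff_count (col : List String) :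
    (∀ n, n + 1 < col.length → (col.drop (n + 1)).count (col.getD n "") ≤ 1)
      ↔ ∀ a, col.count a ≤ 2 := by
  constructor
  · intro h a
    by_contra hc
    push_neg at hc
    obtain ⟨n, h1, h2, h4⟩ := pv_exists_pos col a (by omega)
    have := h n h1
    rw [h2] at this
    omega
  · intro h n hn
    set a := col.getD n "" with ha
    have hmem : a ∈ col.take (n + 1) := by
      have hlt : n < (col.take (n + 1)).length := by simp; omega
      have : (col.take (n + 1))[n] = col[n] := by
        simp [List.getElem_take]
      have hga : col.getD n "" = col[n] := List.getD_eq_getElem col "" (by omega)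
      have hm := List.getElem_mem hlt
      rw [this] at hm
      rw [ha, hga]
      exact hm
    have hsplit : col.count a = (col.take (n + 1)).count a + (col.drop (n + 1)).count a := by
      conv_lhs => rw [← List.take_append_drop (n + 1) col]
      exact List.count_append ..
    have h1 : 1 ≤ (col.take (n + 1)).count a := List.count_pos_iff.mpr hmem
    have := h a
    omega

-- characterisation of A's per-column test
theorem pv_informative_iff (col : List String) :
    informative col = "True" ↔ ∀ a, col.count a ≤ 2 := by
  rw [← pv_pos_iff_count]
  simp only [informative]
  rw [PySem.List.foldl_append_singleton_eq_map, List.nil_append, pvCheckNums_eq_true_iff]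
  constructor
  · intro h n hn
    have hmem : ((n : Int)) ∈ PySem.List.pyRange 0 ((col.length : Int) - 1) 1 := by
      rw [PySem.List.mem_pyRange_one]; omega
    have h2 := h _ (List.mem_map_of_mem hmem)
    rw [pv_inner_eq_count col n (by omega)] at h2
    exact_mod_cast h2
  · intro h v hv
    obtain ⟨i, hi, rfl⟩ := List.mem_map.mp hv
    rw [PySem.List.mem_pyRange_one] at hi
    obtain ⟨hi0, hi1⟩ := hi
    have hin : i = ((i.toNat : Nat) : Int) := (Int.toNat_of_nonneg hi0).symm
    rw [hin, pv_inner_eq_count col i.toNat (by omega)]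
    exact_mod_cast h i.toNat (by omega)

-- the run scan on a sorted tail
theorem pv_runScan_iff (rest : List String) :
    ∀ prev run, 1 ≤ run → run ≤ 2 → rest.Pairwise (· ≤ ·) → (∀ x ∈ rest, prev ≤ x) →
      (pvRunScan prev run rest = true
        ↔ 3 ≤ run + rest.count prev ∨ ∃ a ∈ rest, a ≠ prev ∧ 3 ≤ rest.count a) := by
  induction rest with
  | nil =>
    intro prev run h1 h2 _ _
    simp [pvRunScan]
    omega
  | cons x t ih =>
    intro prev run h1 h2 hpw hall
    rw [List.pairwise_cons] at hpw
    obtain ⟨hxle, hpw'⟩ := hpw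
    by_cases hx : x = prev
    · subst hx
      by_cases hr : run + 1 = 3
      · have hT : pvRunScan x run (x :: t) = true := by
          simp [pvRunScan, hr]
        rw [hT]
        simp only [true_iff]
        left
        simp [List.count_cons]
        omega
      · have hrun1 : run = 1 := by omega
        subst hrun1
        have hstep : pvRunScan x 1 (x :: t) = pvRunScan x 2 t := by
          simp [pvRunScan]
        rw [hstep, ih x 2 (by omega) (by omega) hpw' hxle]
        constructor
        · rintro (hc | ⟨a, ha, hne, hct⟩)
          · left; simp [List.count_cons]; omega
          · right
            refine ⟨a, List.mem_cons_of_mem _ ha, hne, ?_⟩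
            simp [List.count_cons, beq_iff_eq, hne]
            omega
        · rintro (hc | ⟨a, ha, hne, hct⟩)
          · left; simp [List.count_cons] at hc; omega
          · rcases List.mem_cons.mp ha with rfl | ha'
            · exact absurd rfl hne
            · right
              refine ⟨a, ha', hne, ?_⟩
              simp [List.count_cons, beq_iff_eq, Ne.symm hne] at hct
              omega
    · have hplt : prev < x := lt_of_le_of_ne (hall x (by simp)) (fun hh => hx hh.symm)
      have hstep : pvRunScan prev run (x :: t) = pvRunScan x 1 t := by
        simp [pvRunScan, hx]
      have hcount0 : (x :: t).count prev = 0 := by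
        rw [List.count_eq_zero]
        intro hmem
        rcases List.mem_cons.mp hmem with h' | h'
        · exact absurd h'.symm hx
        · exact absurd (hxle prev h') (not_le.mpr hplt)
      rw [hstep, ih x 1 (by omega) (by omega) hpw' hxle]
      constructor
      · rintro (hc | ⟨a, ha, hne, hct⟩)
        · right
          refine ⟨x, by simp, hx, ?_⟩
          simp [List.count_cons]
          omega
        · right
          have hanep : a ≠ prev := by
            intro hh; subst hh
            exact absurd (hxle _ ha) (not_le.mpr hplt)
          refine ⟨a, List.mem_cons_of_mem _ ha, hanep, ?_⟩
          simp [List.count_cons, beq_iff_eq, Ne.symm hne]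
          omega
      · rintro (hc | ⟨a, ha, hne, hct⟩)
        · rw [hcount0] at hc; omega
        · rcases List.mem_cons.mp ha with rfl | ha'
          · left
            simp [List.count_cons] at hct
            omega
          · by_cases hax : a = x
            · subst hax
              left
              simp [List.count_cons] at hct
              omega
            · right
              refine ⟨a, ha', hax, ?_⟩
              simp [List.count_cons, beq_iff_eq, Ne.symm hax] at hct
              omega

-- B's per-column test on the sorted copy detects a thrice-occurring character
theorem pv_hasTriple_iff (s : List String) (hs : s.Pairwise (· ≤ ·)) :
    pvHasTriple s = true ↔ ∃ a, 3 ≤ s.count a := by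
  match s with
  | [] => simp [pvHasTriple]
  | x :: rest =>
    rw [List.pairwise_cons] at hs
    obtain ⟨hxle, hpw⟩ := hs
    show pvRunScan x 1 rest = true ↔ _
    rw [pv_runScan_iff rest x 1 (by omega) (by omega) hpw hxle]
    constructor
    · rintro (hc | ⟨a, ha, hne, hct⟩)
      · exact ⟨x, by simp [List.count_cons]; omega⟩
      · refine ⟨a, ?_⟩
        simp [List.count_cons, beq_iff_eq, Ne.symm hne]
        omega
    · rintro ⟨a, ha⟩
      by_cases hax : a = x
      · subst hax
        left
        simp [List.count_cons] at ha
        omega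
      · right
        refine ⟨a, ?_, hax, ?_⟩
        · have : 0 < (x :: rest).count a := by omega
          rcases List.mem_cons.mp (List.count_pos_iff.mp this) with rfl | h'
          · exact absurd rfl hax
          · exact h'
        · simp [List.count_cons, beq_iff_eq, Ne.symm hax] at ha
          omega

-- the two per-column tests agree
theorem pv_column_agree (col : List String) :
    (informative col == "True")
      = ! pvHasTriple (PySem.List.sorted col (fun s => s) false) := by
  set S := PySem.List.sorted col (fun s => s) false with hS
  have hpw : S.Pairwise (· ≤ ·) := by
    simpa using PySem.List.sorted_pairwise col (fun s => s)
  have hcnt : ∀ a, S.count a = col.count a := fun a =>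
    (PySem.List.sorted_perm col (fun s => s) false).count_eq a
  by_cases h : pvHasTriple S = true
  · obtain ⟨a, ha⟩ := (pv_hasTriple_iff S hpw).mp h
    rw [hcnt a] at ha
    have hinf : informative col ≠ "True" := by
      intro he
      have := (pv_informative_iff col).mp he a
      omega
    rw [h]
    simpa using hinf
  · have hf : pvHasTriple S = false := by
      revert h; cases pvHasTriple S <;> simp
    have h2 : ∀ a, col.count a ≤ 2 := by
      intro a
      by_contra hc
      exact h ((pv_hasTriple_iff S hpw).mpr ⟨a, by rw [hcnt a]; omega⟩)
    have hT : informative col = "True" := (pv_informative_iff col).mpr h2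
    rw [hf, hT]
    simp

-- ===== VERDICT (by name: the statement is the Claim_ definition above) =====
theorem informative_filter_spec : Claim_equal_informative_filter := by
  intro xs _
  unfold Spec_informative_filter informative_filter informative_filter_alt
  rw [PySem.List.foldl_append_if_eq_filter]
  simp only [List.nil_append]
  congr 1
  funext col
  exact pv_column_agree col
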